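-- pv_equiv track=rewrite | github.com/unicompute/gemstone-py | gemstone_py/_smalltalk_batch.py | parse_escaped_pairs
-- ===== SOURCE A (Python) =====
-- def decode_escaped_field(value: str) -> str:
--     """Decode a field escaped by our Smalltalk-side batch serializers."""
--     if "\\" not in value:
--         return value
--
--     decoded: list[str] = []
--     i = 0
--     while i < len(value):
--         ch = value[i]
--         if ch != "\\":
--             decoded.append(ch)
--             i += 1
--             continue
--
--         i += 1
--         if i >= len(value):
--             decoded.append("\\")
--             break
--
--         escaped = value[i]
--         if escaped == "n":
--             decoded.append("\n")
--         elif escaped == "r":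
--             decoded.append("\r")
--         elif escaped == "p":
--             decoded.append("|")
--         elif escaped == "\\":
--             decoded.append("\\")
--         else:
--             decoded.append("\\")
--             decoded.append(escaped)
--         i += 1
--     return "".join(decoded)
--
-- def parse_escaped_pairs(raw: str | None) -> list[tuple[str, str]]:
--     """Split newline-delimited `key|value` rows into decoded pairs."""
--     if not raw:
--         return []
--
--     pairs: list[tuple[str, str]] = []
--     for line in raw.splitlines():
--         if not line:
--             continue
--         key, sep, value = line.partition("|")
--         if not sep:
--             continue
--         pairs.append((decode_escaped_field(key), decode_escaped_field(value)))
--     return pairs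
-- ===== SOURCE B (Python) =====
-- _TABLE = {"n": "\n", "r": "\r", "p": "|", "\\": "\\"}
--
--
-- def decode_escaped_field(value: str) -> str:
--     """Decode via split-on-backslash: each later segment starts at an escape."""
--     segs = iter(value.split("\\"))
--     out = [next(segs)]
--     for seg in segs:
--         if seg:
--             out.append(_TABLE.get(seg[0], "\\" + seg[0]) + seg[1:])
--         else:
--             nxt = next(segs, None)
--             if nxt is None:
--                 out.append("\\")          # lone trailing backslash
--             else:
--                 out.append("\\" + nxt)    # escaped backslash, then literal text
--     return "".join(out)
--
--
-- def parse_escaped_pairs(raw):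
--     """Split newline-delimited `key|value` rows into decoded pairs."""
--     if not raw:
--         return []
--     return [
--         (decode_escaped_field(key), decode_escaped_field(value))
--         for key, sep, value in (line.partition("|") for line in raw.splitlines())
--         if sep
--     ]
-- ===== Notes on version B (the rewrite author's own statement) =====
-- stated objective: idiomatic
-- what changed: decode_escaped_field's manual index-walking while/if ladder is replaced by splitting the field on backslashes once and folding the segment list through an escape lookup table, and the top-level append loop becomes a comprehension over partitioned lines.
import Mathlib
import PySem

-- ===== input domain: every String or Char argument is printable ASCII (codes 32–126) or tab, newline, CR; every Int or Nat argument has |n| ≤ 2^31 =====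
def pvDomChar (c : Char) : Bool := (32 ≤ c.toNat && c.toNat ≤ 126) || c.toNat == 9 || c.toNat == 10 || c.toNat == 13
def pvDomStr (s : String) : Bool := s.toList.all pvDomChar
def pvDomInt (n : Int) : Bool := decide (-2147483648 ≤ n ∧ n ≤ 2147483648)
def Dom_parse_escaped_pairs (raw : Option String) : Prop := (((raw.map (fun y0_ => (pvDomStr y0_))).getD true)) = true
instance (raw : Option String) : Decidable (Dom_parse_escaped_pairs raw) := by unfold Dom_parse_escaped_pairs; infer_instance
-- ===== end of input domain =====

-- B replaces A's index-walking escape decoder by a split-on-backslash segment pass (simpler/idiomatic; same cost).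

-- shared exact port of line.partition("|") for the single-char separator "|":
-- returns (before, sep-found?, after); (line, false, []) when "|" is absent, as Python's (line, "", "").
def pvPartBar : List Char → List Char × Bool × List Char
  | [] => ([], false, [])
  | c :: t =>
    if c = '|' then ([], true, t)
    else
      let (k, f, v) := pvPartBar t
      (c :: k, f, v)

-- ===== PORT A =====
-- A's while-loop over the index i, as recursion on the remaining characters.
def pvDecAGo : List Char → List Char
  | [] => []
  | c :: rest =>
    if c ≠ '\\' then c :: pvDecAGo rest
    else
      match rest with
      | [] => ['\\']
      | e :: rest' =>
        (if e = 'n' then ['\n']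
         else if e = 'r' then ['\r']
         else if e = 'p' then ['|']
         else if e = '\\' then ['\\']
         else ['\\', e]) ++ pvDecAGo rest'

def pvDecA (value : List Char) : List Char :=
  if PySem.Chars.isIn ['\\'] value = false then value else pvDecAGo value

def parse_escaped_pairs (raw : Option String) : List (String × String) :=
  match raw with
  | none => []
  | some s =>
    if s = "" then []
    else
      (PySem.Chars.splitlines s.toList).foldl
        (fun pairs line =>
          if line = [] then pairs
          else
            let (key, sep, value) := pvPartBar line
            if sep = false then pairs
            else pairs ++ [(String.ofList (pvDecA key), String.ofList (pvDecA value))])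
        []

-- ===== PORT B =====
-- exact port of value.split("\\") for the single-char separator "\\"
def pvSplitBS : List Char → List (List Char)
  | [] => [[]]
  | c :: t =>
    if c = '\\' then [] :: pvSplitBS t
    else
      match pvSplitBS t with
      | [] => [[c]]
      | s :: ss => (c :: s) :: ss

def pvTableB (c : Char) : List Char :=
  if c = 'n' then ['\n']
  else if c = 'r' then ['\r']
  else if c = 'p' then ['|']
  else if c = '\\' then ['\\']
  else ['\\', c]

-- B's for-loop over the segment iterator (every later segment starts just after a backslash)
def pvGoB : List (List Char) → List Char
  | [] => []
  | seg :: rest =>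
    match seg with
    | c :: cs => pvTableB c ++ cs ++ pvGoB rest
    | [] =>
      match rest with
      | [] => ['\\']
      | nxt :: rest' => ('\\' :: nxt) ++ pvGoB rest'

def pvDecB (value : List Char) : List Char :=
  match pvSplitBS value with
  | [] => []
  | s0 :: rest => s0 ++ pvGoB rest

def parse_escaped_pairs_alt (raw : Option String) : List (String × String) :=
  match raw with
  | none => []
  | some s =>
    if s = "" then []
    else
      (PySem.Chars.splitlines s.toList).filterMap
        (fun line =>
          let (key, sep, value) := pvPartBar line
          if sep then some (String.ofList (pvDecB key), String.ofList (pvDecB value)) else none)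

-- ===== PRECONDITION & SPEC =====
def Spec_parse_escaped_pairs (raw : Option String) (out : List (String × String)) : Prop := out = parse_escaped_pairs_alt raw
instance (raw : Option String) (out : List (String × String)) : Decidable (Spec_parse_escaped_pairs raw out) := by unfold Spec_parse_escaped_pairs; infer_instance

-- ===== CLAIM (what is proved, stated in full; the proofs are below) =====
def Claim_equal_parse_escaped_pairs : Prop := ∀ (raw : Option String), Dom_parse_escaped_pairs raw → Spec_parse_escaped_pairs raw (parse_escaped_pairs raw)

-- ===== LEMMAS AND PROOFS =====
theorem pvSplitBS_ne_nil (l : List Char) : pvSplitBS l ≠ [] := by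
  cases l with
  | nil => simp [pvSplitBS]
  | cons c t =>
    simp only [pvSplitBS]
    split
    · simp
    · cases h : pvSplitBS t <;> simp

theorem pvDecB_eq_pvDecAGo (n : ℕ) : ∀ l : List Char, l.length ≤ n → pvDecB l = pvDecAGo l := by
  induction n with
  | zero =>
    intro l hl
    have : l = [] := List.eq_nil_of_length_eq_zero (Nat.le_zero.mp hl)
    subst this
    rfl
  | succ n ih =>
    intro l hl
    match l with
    | [] => rfl
    | c :: t =>
      by_cases hc : c = '\\'
      · subst hc
        match t with
        | [] => rfl
        | c' :: t' =>
          obtain ⟨s0, rest, hsp⟩ : ∃ s0 rest, pvSplitBS t' = s0 :: rest := by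
            cases h : pvSplitBS t' with
            | nil => exact absurd h (pvSplitBS_ne_nil t')
            | cons a b => exact ⟨a, b, rfl⟩
          have iht : pvDecB t' = pvDecAGo t' := by
            apply ih; simp at hl ⊢; omega
          simp only [pvDecB, hsp] at iht
          by_cases hc' : c' = '\\'
          · subst hc'
            simp [pvDecB, pvSplitBS, hsp, pvGoB, pvDecAGo, iht]
          · simp [pvDecB, pvSplitBS, hsp, hc', pvGoB, pvDecAGo, pvTableB, iht]
      · obtain ⟨s0, rest, hsp⟩ : ∃ s0 rest, pvSplitBS t = s0 :: rest := by
          cases h : pvSplitBS t with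
          | nil => exact absurd h (pvSplitBS_ne_nil t)
          | cons a b => exact ⟨a, b, rfl⟩
        have iht : pvDecB t = pvDecAGo t := by
          apply ih; simp at hl ⊢; omega
        simp only [pvDecB, hsp] at iht
        show pvDecB (c :: t) = pvDecAGo (c :: t)
        simp only [pvDecB, pvSplitBS, hsp, if_neg hc]
        rw [List.cons_append, iht]
        conv_rhs => rw [pvDecAGo.eq_def]
        simp [hc]

theorem pvDecAGo_of_not_mem {l : List Char} (h : '\\' ∉ l) : pvDecAGo l = l := by
  induction l with
  | nil => rfl
  | cons c t iht =>
    rw [List.mem_cons, not_or] at h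
    have hc : ¬ c = '\\' := fun e => h.1 e.symm
    rw [pvDecAGo.eq_def]
    simp [hc, iht h.2]

theorem pvDecB_eq_pvDecA (l : List Char) : pvDecB l = pvDecA l := by
  have hgo : pvDecB l = pvDecAGo l := pvDecB_eq_pvDecAGo l.length l le_rfl
  by_cases h : PySem.Chars.isIn ['\\'] l = false
  · have hnm : '\\' ∉ l := by
      intro hm
      have : ['\\'] <:+: l := by
        obtain ⟨p, q, hpq⟩ := List.append_of_mem hm
        exact ⟨p, q, by simp [hpq]⟩
      rw [PySem.Chars.isIn_eq_false_iff] at h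
      exact h this
    rw [hgo, pvDecAGo_of_not_mem hnm, pvDecA, if_pos h]
  · rw [hgo, pvDecA, if_neg h]

theorem pv_fold_eq_filterMap (lines : List (List Char)) (acc : List (String × String)) :
    lines.foldl
      (fun pairs line =>
        if line = [] then pairs
        else
          let (key, sep, value) := pvPartBar line
          if sep = false then pairs
          else pairs ++ [(String.ofList (pvDecA key), String.ofList (pvDecA value))])
      acc
    = acc ++ lines.filterMap
        (fun line =>
          let (key, sep, value) := pvPartBar line
          if sep then some (String.ofList (pvDecB key), String.ofList (pvDecB value)) else none) := by
  induction lines generalizing acc with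
  | nil => simp
  | cons line rest ih =>
    simp only [List.foldl_cons, List.filterMap_cons]
    by_cases he : line = []
    · subst he
      simp [pvPartBar, ih]
    · rcases hp : pvPartBar line with ⟨k, f, v⟩
      cases f
      · simp [he, ih]
      · simp [he, ih, pvDecB_eq_pvDecA]

-- ===== VERDICT (by name: the statement is the Claim_ definition above) =====
theorem parse_escaped_pairs_spec : Claim_equal_parse_escaped_pairs := by
  intro raw _
  unfold Spec_parse_escaped_pairs parse_escaped_pairs parse_escaped_pairs_alt
  match raw with
  | none => rfl
  | some s =>
    by_cases hs : s = ""
    · simp [hs]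
    · simp only [if_neg hs]
      rw [pv_fold_eq_filterMap]
      simp
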